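-- pv_equiv track=rewrite | github.com/PebbleRoad/table2rules | cleanup.py | deduplicate_headers
-- ===== SOURCE A (Python) =====
-- from typing import List
--
-- def deduplicate_headers(headers: List[str]) -> List[str]:
--     """
--     Remove exact duplicates and substring duplicates.
--
--     Rules:
--     - If "APAC" appears twice, keep one
--     - If "APAC" and "APAC Subtotal" both appear, keep only "APAC Subtotal"
--     """
--     # Remove exact duplicates while preserving order
--     seen = set()
--     unique = []
--     for h in headers:
--         if h not in seen:
--             seen.add(h)
--             unique.append(h)
--
--     # Remove substrings: if header A is fully contained in header B, remove A
--     filtered = []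
--     for i, header in enumerate(unique):
--         is_substring = False
--         for j, other in enumerate(unique):
--             if i != j and header in other and header != other:
--                 is_substring = True
--                 break
--
--         if not is_substring:
--             filtered.append(header)
--
--     return filtered
-- ===== SOURCE B (Python) =====
-- def deduplicate_headers(headers):
--     # Exact dedup preserving first-occurrence order
--     unique = list(dict.fromkeys(headers))
--     # Grow the set of maximal headers in descending-length order:
--     # a header survives iff it is not contained in any already-kept (longer) header.
--     kept = []
--     for h in sorted(unique, key=len, reverse=True):
--         if not any(h in k for k in kept):
--             kept.append(h)
--     kept_set = set(kept)
--     # Restore original order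
--     return [h for h in unique if h in kept_set]
-- ===== Notes on version B (the rewrite author's own statement) =====
-- stated objective: alternative
-- what changed: Replaces A's symmetric all-pairs substring scan over the unique list with a sort-by-descending-length pass that incrementally grows the set of maximal headers (each header checked only against already-kept longer headers), then filters the unique list in original order.
import Mathlib
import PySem

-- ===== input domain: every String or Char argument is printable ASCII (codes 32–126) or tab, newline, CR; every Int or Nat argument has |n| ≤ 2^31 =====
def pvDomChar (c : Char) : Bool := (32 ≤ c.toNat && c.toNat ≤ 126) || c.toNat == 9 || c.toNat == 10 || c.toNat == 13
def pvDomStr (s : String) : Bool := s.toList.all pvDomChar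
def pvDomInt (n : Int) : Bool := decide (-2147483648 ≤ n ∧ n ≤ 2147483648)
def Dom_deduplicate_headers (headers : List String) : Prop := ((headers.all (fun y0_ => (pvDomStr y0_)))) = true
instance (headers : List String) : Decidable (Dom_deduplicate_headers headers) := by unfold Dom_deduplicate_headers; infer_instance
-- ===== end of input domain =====

-- B replaces A's symmetric all-pairs substring scan with a sort-by-descending-length pass that
-- grows the set of maximal headers incrementally; same return value (alternative structure).

-- ===== PORT A =====
def deduplicate_headers (headers : List String) : List String :=
  -- first loop: exact dedup with a seen-set
  let su : PySem.Set String × List String :=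
    headers.foldl (fun p h =>
      if PySem.Set.contains p.1 h = false then (PySem.Set.add p.1 h, p.2 ++ [h]) else p)
      (PySem.Set.empty, [])
  let unique := su.2
  -- second loop: drop headers that are a proper substring of another unique header
  (PySem.List.enumerate unique 0).foldl (fun filtered p =>
    let is_substring :=
      (PySem.List.enumerate unique 0).any (fun q =>
        (p.1 != q.1) && PySem.Str.isIn p.2 q.2 && (p.2 != q.2))
    if is_substring = false then filtered ++ [p.2] else filtered) []

-- ===== PORT B =====
def deduplicate_headers_alt (headers : List String) : List String :=
  let unique := PySem.List.dedup headers
  let kept :=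
    (PySem.List.sorted unique (fun s => PySem.Str.len s) true).foldl
      (fun kept h => if kept.any (fun k => PySem.Str.isIn h k) then kept else kept ++ [h]) []
  unique.filter (fun h => kept.contains h)

-- ===== PRECONDITION & SPEC =====
def Spec_deduplicate_headers (headers : List String) (out : List String) : Prop := out = deduplicate_headers_alt headers
instance (headers : List String) (out : List String) : Decidable (Spec_deduplicate_headers headers out) := by unfold Spec_deduplicate_headers; infer_instance

-- ===== CLAIM (what is proved, stated in full; the proofs are below) =====
def Claim_equal_deduplicate_headers : Prop := ∀ (headers : List String), Dom_deduplicate_headers headers → Spec_deduplicate_headers headers (deduplicate_headers headers)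

-- ===== LEMMAS AND PROOFS =====

-- "h survives": no other element of t properly contains h, as a Bool predicate over a reference list t
def pvKeep (t : List String) (h : String) : Bool :=
  !(t.any (fun o => (o != h) && PySem.Str.isIn h o))

lemma pvKeep_false_iff (t : List String) (h : String) :
    pvKeep t h = false ↔ ∃ o ∈ t, o ≠ h ∧ PySem.Str.isIn h o = true := by
  simp only [pvKeep, Bool.not_eq_false', List.any_eq_true, Bool.and_eq_true, bne_iff_ne]

lemma pvKeep_congr (t t' : List String) (hm : ∀ x, x ∈ t ↔ x ∈ t') (h : String) :
    pvKeep t h = pvKeep t' h := by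
  have key : ∀ (f : String → Bool), t.any f = t'.any f := by
    intro f
    cases e : t'.any f
    · rw [List.any_eq_false] at e ⊢
      exact fun o ho => e o ((hm o).mp ho)
    · rw [List.any_eq_true] at e ⊢
      obtain ⟨o, ho, hp⟩ := e
      exact ⟨o, (hm o).mpr ho, hp⟩
  simp only [pvKeep, key]

lemma pvStr_eq_of_toList (s t : String) (h : s.toList = t.toList) : s = t := by
  have := congrArg String.ofList h
  simpa [String.ofList_toList] using this

-- a proper substring is strictly shorter
lemma pvLen_lt (x o : String) (hne : o ≠ x) (hin : PySem.Str.isIn x o = true) :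
    x.toList.length < o.toList.length := by
  rw [PySem.Str.isIn_iff_infix] at hin
  rcases Nat.lt_or_ge x.toList.length o.toList.length with h | h
  · exact h
  · exact absurd (pvStr_eq_of_toList x o (hin.eq_of_length (le_antisymm hin.length_le h)))
      (fun e => hne e.symm)

-- A's first loop produces (dedup, dedup)
lemma pvA_first (headers : List String) :
    headers.foldl (fun p h =>
      if PySem.Set.contains p.1 h = false then (PySem.Set.add p.1 h, p.2 ++ [h]) else p)
      (PySem.Set.empty, []) = (PySem.List.dedup headers, PySem.List.dedup headers) := by
  have key : ∀ (hs : List String) (d : List String),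
      hs.foldl (fun p h =>
        if PySem.Set.contains p.1 h = false then (PySem.Set.add p.1 h, p.2 ++ [h]) else p)
        (d, d) = (hs.foldl PySem.Set.add d, hs.foldl PySem.Set.add d) := by
    intro hs
    induction hs with
    | nil => intro d; rfl
    | cons h tl ih =>
      intro d
      by_cases hmem : h ∈ d
      · have hc : PySem.Set.contains d h = true := (PySem.Set.contains_iff d h).mpr hmem
        have ha : PySem.Set.add d h = d := by simp [PySem.Set.add, hmem]
        simp only [List.foldl_cons, hc, ha]
        rw [if_neg (by decide)]
        exact ih d
      · have hc : PySem.Set.contains d h = false := by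
          cases e : PySem.Set.contains d h
          · rfl
          · exact absurd ((PySem.Set.contains_iff d h).mp e) hmem
        have ha : PySem.Set.add d h = d ++ [h] := by simp [PySem.Set.add, hmem]
        simp only [List.foldl_cons, hc, ha]
        rw [if_pos trivial]
        exact ih (d ++ [h])
  rw [show (PySem.Set.empty : PySem.Set String) = ([] : List String) from rfl, key headers [],
    show headers.foldl PySem.Set.add [] = PySem.List.dedup headers from by
      rw [PySem.List.dedup_eq_ofList, PySem.Set.ofList_eq_foldl]]

-- A's second loop equals filtering unique by pvKeep
lemma pvA_second (unique : List String) :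
    (PySem.List.enumerate unique 0).foldl (fun filtered p =>
      let is_substring :=
        (PySem.List.enumerate unique 0).any (fun q =>
          (p.1 != q.1) && PySem.Str.isIn p.2 q.2 && (p.2 != q.2))
      if is_substring = false then filtered ++ [p.2] else filtered) []
    = unique.filter (pvKeep unique) := by
  have hfun : (fun (filtered : List String) (p : Int × String) =>
      let is_substring :=
        (PySem.List.enumerate unique 0).any (fun q =>
          (p.1 != q.1) && PySem.Str.isIn p.2 q.2 && (p.2 != q.2))
      if is_substring = false then filtered ++ [p.2] else filtered)
      = (fun filtered p =>
        if !((PySem.List.enumerate unique 0).any (fun q =>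
          (p.1 != q.1) && PySem.Str.isIn p.2 q.2 && (p.2 != q.2))) then filtered ++ [(·.2) p] else filtered) := by
    funext filtered p
    cases hb : (PySem.List.enumerate unique 0).any (fun q =>
        (p.1 != q.1) && PySem.Str.isIn p.2 q.2 && (p.2 != q.2))
    · simp
    · simp
  rw [hfun, PySem.List.foldl_append_if, List.nil_append]
  -- pointwise: for members of the enumeration, the indexed test equals pvKeep
  have hmem : ∀ p ∈ PySem.List.enumerate unique 0,
      (!((PySem.List.enumerate unique 0).any (fun q =>
        (p.1 != q.1) && PySem.Str.isIn p.2 q.2 && (p.2 != q.2)))) = pvKeep unique p.2 := by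
    rintro p hp
    rw [PySem.List.mem_enumerate_iff] at hp
    obtain ⟨k, hk, rfl⟩ := hp
    simp only [pvKeep]
    have key : ((PySem.List.enumerate unique 0).any (fun q =>
          (((0 : Int) + k, unique[k]).1 != q.1) && PySem.Str.isIn ((0 : Int) + k, unique[k]).2 q.2
            && (((0 : Int) + k, unique[k]).2 != q.2)))
        = (unique.any (fun o => (o != ((0 : Int) + ↑k, unique[k]).2) && PySem.Str.isIn ((0 : Int) + ↑k, unique[k]).2 o)) := by
      rw [Bool.eq_iff_iff]
      simp only [List.any_eq_true]
      constructor
      · rintro ⟨q, hq, hcond⟩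
        rw [PySem.List.mem_enumerate_iff] at hq
        obtain ⟨j, hj, rfl⟩ := hq
        simp only [bne_iff_ne, Bool.and_eq_true] at hcond ⊢
        exact ⟨unique[j], List.getElem_mem hj, ⟨Ne.symm hcond.2, hcond.1.2⟩⟩
      · rintro ⟨o, ho, hcond⟩
        simp only [Bool.and_eq_true, bne_iff_ne] at hcond
        obtain ⟨j, hj, rfl⟩ := List.mem_iff_getElem.mp ho
        refine ⟨((0 : Int) + j, unique[j]), ?_, ?_⟩
        · rw [PySem.List.mem_enumerate_iff]; exact ⟨j, hj, rfl⟩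
        · simp only [Bool.and_eq_true, bne_iff_ne]
          have hkj : k ≠ j := by
            intro e; exact hcond.1 (by simp [e])
          exact ⟨⟨by simpa using fun e => hkj (by exact_mod_cast e), hcond.2⟩, Ne.symm hcond.1⟩
    rw [key]
  rw [List.filter_congr hmem]
  -- push the filter through the projection
  have hpush : ∀ (l : List (Int × String)) (pr : String → Bool),
      (l.filter (fun q => pr q.2)).map (·.2) = (l.map (·.2)).filter pr := by
    intro l pr
    induction l with
    | nil => rfl
    | cons a l ih => by_cases h : pr a.2 <;> simp [h, ih]
  rw [show (fun (p : Int × String) => pvKeep unique p.2)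
      = (fun (p : Int × String) => (pvKeep unique) p.2) from rfl,
    hpush, PySem.List.map_snd_enumerate]

-- B's loop invariant: on a nodup, length-descending list, the kept list is the filter by pvKeep
lemma pvB_loop (t : List String) (hnd : t.Nodup)
    (hpw : t.Pairwise (fun a b => PySem.Str.len b ≤ PySem.Str.len a)) :
    ∀ (s d : List String), t = d ++ s →
      s.foldl (fun kept h => if kept.any (fun k => PySem.Str.isIn h k) then kept else kept ++ [h])
        (d.filter (pvKeep t)) = t.filter (pvKeep t) := by
  intro s
  induction s with
  | nil => intro d hd; simp [hd]
  | cons x s' ih =>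
    intro d hd
    have hxd : x ∉ d := by
      intro hx
      have hdisj := List.disjoint_of_nodup_append (hd ▸ hnd)
      rw [List.disjoint_left] at hdisj
      exact hdisj hx (by simp)
    -- the test against kept-so-far decides pvKeep t x
    have hany : (d.filter (pvKeep t)).any (fun k => PySem.Str.isIn x k) = !(pvKeep t x) := by
      rw [Bool.eq_iff_iff, List.any_eq_true, Bool.not_eq_true', pvKeep_false_iff]
      constructor
      · rintro ⟨k, hk, hin⟩
        rw [List.mem_filter] at hk
        have hkd : k ∈ d := hk.1
        have hkt : k ∈ t := by rw [hd]; exact List.mem_append.mpr (Or.inl hkd)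
        have hkx : k ≠ x := fun e => hxd (e ▸ hkd)
        exact ⟨k, hkt, hkx, hin⟩
      · rintro ⟨o, ho, hne, hin⟩
        -- pick a maximal-length container of x in t
        set C := t.filter (fun o => (o != x) && PySem.Str.isIn x o) with hC
        have hoC : o ∈ C := by
          rw [hC, List.mem_filter]
          refine ⟨ho, ?_⟩
          simp only [Bool.and_eq_true, bne_iff_ne]
          exact ⟨hne, hin⟩
        have hCne : C ≠ [] := fun e => by simp [e] at hoC
        obtain ⟨m, hm⟩ : ∃ m, C.argmax (fun s => s.toList.length) = some m := by
          cases e : C.argmax (fun s => s.toList.length)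
          · exact absurd (List.argmax_eq_none.mp e) hCne
          · exact ⟨_, rfl⟩
        have hmC := List.argmax_mem hm
        rw [hC, List.mem_filter] at hmC
        have hmt : m ∈ t := hmC.1
        have hmx : m ≠ x := by simpa using (Bool.and_eq_true _ _ |>.mp hmC.2).1
        have hmin : PySem.Str.isIn x m = true := (Bool.and_eq_true _ _ |>.mp hmC.2).2
        have hxm : x.toList.length < m.toList.length := pvLen_lt x m hmx hmin
        -- m is kept: anything properly containing m would be a longer container of x
        have hPm : pvKeep t m = true := by
          cases e : pvKeep t m
          · exfalso
            obtain ⟨z, hz, hzm, hzin⟩ := (pvKeep_false_iff t m).mp e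
            have hmz : m.toList.length < z.toList.length := pvLen_lt m z hzm hzin
            have hxz : PySem.Str.isIn x z = true := by
              rw [PySem.Str.isIn_iff_infix] at hmin hzin ⊢
              exact hmin.trans hzin
            have hzx : z ≠ x := by
              intro e2; rw [e2] at hmz; omega
            have hzC : z ∈ C := by
              rw [hC, List.mem_filter]
              refine ⟨hz, ?_⟩
              simp only [Bool.and_eq_true, bne_iff_ne]
              exact ⟨hzx, hxz⟩
            have := List.le_of_mem_argmax hzC hm
            simp only at this; omega
          · rfl
        -- m was processed before x: it is in d
        have hmd : m ∈ d := by
          rw [hd] at hmt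
          rcases List.mem_append.mp hmt with h | h
          · exact h
          · rcases List.mem_cons.mp h with h | h
            · exact absurd h hmx
            · exfalso
              have hrel := (List.pairwise_append.mp (hd ▸ hpw)).2.1
              have hlen := (List.pairwise_cons.mp hrel).1 m h
              rw [PySem.Str.len_eq, PySem.Str.len_eq] at hlen
              have : m.toList.length ≤ x.toList.length := by exact_mod_cast hlen
              omega
        exact ⟨m, List.mem_filter.mpr ⟨hmd, hPm⟩, hmin⟩
    -- one step of the fold
    have hstep : (if (d.filter (pvKeep t)).any (fun k => PySem.Str.isIn x k)
          then d.filter (pvKeep t) else d.filter (pvKeep t) ++ [x])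
        = (d ++ [x]).filter (pvKeep t) := by
      rw [List.filter_append]
      cases e : pvKeep t x
      · rw [hany]; simp [e]
      · rw [hany]; simp [e]
    rw [List.foldl_cons, hstep]
    exact ih (d ++ [x]) (by simp [hd])

-- B's result, characterised: the exact-dedup list filtered by pvKeep
lemma pvB_char (headers : List String) :
    deduplicate_headers_alt headers
      = (PySem.List.dedup headers).filter (pvKeep (PySem.List.dedup headers)) := by
  have hdef : deduplicate_headers_alt headers
      = (PySem.List.dedup headers).filter (fun h =>
        ((PySem.List.sorted (PySem.List.dedup headers) (fun s => PySem.Str.len s) true).foldl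
          (fun kept h => if kept.any (fun k => PySem.Str.isIn h k) then kept else kept ++ [h])
          []).contains h) := rfl
  rw [hdef]
  have hperm : (PySem.List.sorted (PySem.List.dedup headers) (fun s => PySem.Str.len s) true).Perm
      (PySem.List.dedup headers) := by apply PySem.List.sorted_perm
  have hnd : (PySem.List.sorted (PySem.List.dedup headers) (fun s => PySem.Str.len s) true).Nodup :=
    hperm.nodup_iff.mpr (PySem.List.nodup_dedup headers)
  have hpw : (PySem.List.sorted (PySem.List.dedup headers) (fun s => PySem.Str.len s) true).Pairwise
      (fun a b => PySem.Str.len b ≤ PySem.Str.len a) := by apply PySem.List.sorted_pairwise_rev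
  have hkept := pvB_loop _ hnd hpw
    (PySem.List.sorted (PySem.List.dedup headers) (fun s => PySem.Str.len s) true) [] (by simp)
  simp only [List.filter_nil] at hkept
  rw [hkept]
  apply List.filter_congr
  intro h hh
  have hmemiff : ∀ x, x ∈ PySem.List.sorted (PySem.List.dedup headers) (fun s => PySem.Str.len s) true
      ↔ x ∈ PySem.List.dedup headers := by
    intro x; apply PySem.List.mem_sorted
  have h1 : h ∈ PySem.List.sorted (PySem.List.dedup headers) (fun s => PySem.Str.len s) true :=
    (hmemiff h).mpr hh
  have h2 := pvKeep_congr _ _ hmemiff h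
  have hc : ∀ (l : List String), l.contains h = decide (h ∈ l) := by intro l; simp
  rw [hc, ← h2]
  cases e : pvKeep (PySem.List.sorted (PySem.List.dedup headers) (fun s => PySem.Str.len s) true) h
  · exact decide_eq_false (fun hm =>
      absurd (List.mem_filter.mp hm).2 (by rw [e]; exact Bool.false_ne_true))
  · exact decide_eq_true (List.mem_filter.mpr ⟨h1, e⟩)

-- ===== VERDICT (by name: the statement is the Claim_ definition above) =====
theorem deduplicate_headers_spec : Claim_equal_deduplicate_headers := by
  intro headers _
  unfold Spec_deduplicate_headers
  rw [pvB_char]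
  have hA : deduplicate_headers headers
      = (PySem.List.enumerate ((headers.foldl (fun p h =>
          if PySem.Set.contains p.1 h = false then (PySem.Set.add p.1 h, p.2 ++ [h]) else p)
          (PySem.Set.empty, [])).2) 0).foldl (fun filtered p =>
            let is_substring := (PySem.List.enumerate ((headers.foldl (fun p h =>
              if PySem.Set.contains p.1 h = false then (PySem.Set.add p.1 h, p.2 ++ [h]) else p)
              (PySem.Set.empty, [])).2) 0).any (fun q =>
                (p.1 != q.1) && PySem.Str.isIn p.2 q.2 && (p.2 != q.2))
            if is_substring = false then filtered ++ [p.2] else filtered) [] := rfl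
  rw [hA, pvA_first]
  exact pvA_second (PySem.List.dedup headers)
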